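-- pv_equiv track=rewrite | github.com/MD-Levitan/cryptanalyst | DiscreteLog/BSGS.py | baby_list
-- ===== SOURCE A (Python) =====
-- import math
--
-- def compute_m(p):
--     m = math.ceil(math.sqrt(p-1))
--     return m
--
-- def baby_list(g, p):
--     m = int(compute_m(p))
--     # b = list(range(0, m))
--     # s = map((lambda x: pow(g, x, p)), b)  # create list of powers
--     # x = dict(zip(s, b))  # zip list of powers and positions into a dictionary
--     #
--
--     # Faster
--     x = dict()
--     pow_ = 1
--     for i in range(0, m):
--         x[pow_] = i
--         pow_ = pow_ * g % p
--
--     return x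
-- ===== SOURCE B (Python) =====
-- import math
--
-- def baby_list(g, p):
--     m = int(math.ceil(math.sqrt(p - 1)))
--     # Stage 1: build the table [g^0, g^1, ..., g^(m-1)] mod p by repeated doubling:
--     # from the half-table [g^0..g^(n-1)] and its last entry, the next n entries are
--     # obtained by multiplying the whole half-table by h = g^n mod p.
--     powers = [1]
--     while len(powers) < m:
--         h = powers[-1] * g % p
--         powers += [x * h % p for x in powers]
--     # Stage 2: pair the truncated table with positions; dict(zip(...)) keeps range
--     # order, later positions overwriting earlier ones for duplicate powers, as in A.
--     return dict(zip(powers[:m], range(m)))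
-- ===== Notes on version B (the rewrite author's own statement) =====
-- stated objective: alternative
-- what changed: A fills the dict in one loop carrying a running product; B first builds the whole power table by repeated doubling (multiplying the half-table by its successor power), then in a second stage zips the truncated table with range(m) into the dict.
import Mathlib
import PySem

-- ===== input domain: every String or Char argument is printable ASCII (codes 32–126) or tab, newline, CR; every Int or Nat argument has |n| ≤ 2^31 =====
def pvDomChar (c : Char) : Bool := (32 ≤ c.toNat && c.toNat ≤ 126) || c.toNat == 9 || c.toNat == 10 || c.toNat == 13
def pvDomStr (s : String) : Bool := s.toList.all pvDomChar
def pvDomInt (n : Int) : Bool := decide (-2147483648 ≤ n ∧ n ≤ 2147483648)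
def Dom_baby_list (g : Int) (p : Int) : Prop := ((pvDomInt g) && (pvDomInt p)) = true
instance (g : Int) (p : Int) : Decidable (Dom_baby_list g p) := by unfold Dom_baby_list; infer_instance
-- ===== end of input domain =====

-- B replaces A's single running-product loop by two stages: the power table
-- [g^0..g^(m-1)] mod p is built by repeated doubling (multiplying the half-table
-- by its successor power), then zipped with range(m) into the dict. No mutation
-- of arguments on either side; same cost, different structure ('alternative').

-- ===== PORT A =====
-- port of compute_m: int(math.ceil(math.sqrt(p-1))); exact integer ceil-sqrt,
-- which agrees with the float computation for 0 ≤ p-1 ≤ 2^31 (double sqrt is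
-- correctly rounded and the gap to the nearest integer exceeds one ulp there).
def pvCeilSqrt (n : Int) : Int :=
  let k := Nat.sqrt n.toNat
  if k * k = n.toNat then (k : Int) else ((k : Int) + 1)

def baby_list (g : Int) (p : Int) : List (Int × Int) :=
  let m := pvCeilSqrt (p - 1)
  let st := (PySem.List.pyRange 0 m 1).foldl
    (fun (st : PySem.Dict Int Int × Int) i =>
      (st.1.insert st.2 i, PySem.Int.mod (st.2 * g) p))
    (PySem.Dict.empty, 1)
  st.1.items

-- ===== PORT B =====
-- the while-loop of Source B; fuel (= m) only makes the recursion total: the list at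
-- least doubles each pass, so starting from [1] the fuel is never exhausted.
-- powers[-1] is ported as pyGetD … (-1) 0: the list is never empty here.
def pvGrow (g p : Int) (m : Nat) : Nat → List Int → List Int
  | 0, powers => powers
  | f + 1, powers =>
    if powers.length < m then
      pvGrow g p m f (powers ++ powers.map
        (fun x => PySem.Int.mod (x * PySem.Int.mod (PySem.List.pyGetD powers (-1) 0 * g) p) p))
    else powers

def baby_list_alt (g : Int) (p : Int) : List (Int × Int) :=
  let m := pvCeilSqrt (p - 1)
  let powers := (pvGrow g p m.toNat m.toNat [1]).take m.toNat
  ((powers.zip (PySem.List.pyRange 0 m 1)).foldl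
    (fun (d : PySem.Dict Int Int) kv => d.insert kv.1 kv.2) PySem.Dict.empty).items

-- ===== PRECONDITION & SPEC =====
-- For p ≤ 0 the Python A raises (math.sqrt of a negative number): excluded.
def Pre_baby_list (_g : Int) (p : Int) : Prop := 1 ≤ p
instance (g : Int) (p : Int) : Decidable (Pre_baby_list g p) := by unfold Pre_baby_list; infer_instance
def pvWitness_baby_list : Int × Int := (2, 11)

def Spec_baby_list (g : Int) (p : Int) (out : List (Int × Int)) : Prop := out = baby_list_alt g p
instance (g : Int) (p : Int) (out : List (Int × Int)) : Decidable (Spec_baby_list g p out) := by unfold Spec_baby_list; infer_instance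

-- ===== CLAIM (what is proved, stated in full; the proofs are below) =====
def Claim_equal_baby_list : Prop := ∀ (g : Int) (p : Int), Dom_baby_list g p → Pre_baby_list g p → Spec_baby_list g p (baby_list g p)

-- ===== LEMMAS AND PROOFS =====

-- mod step: ((g^k mod p) * g) mod p = g^(k+1) mod p, for 0 < p
lemma pv_mod_step (g p : Int) (hp : 0 < p) (k : Nat) :
    PySem.Int.mod (PySem.Int.powMod g k p * g) p = PySem.Int.powMod g (k + 1) p := by
  simp only [PySem.Int.powMod, PySem.Int.mod_eq_emod_of_pos hp]
  conv_rhs => rw [pow_succ, Int.mul_emod]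
  conv_lhs => rw [Int.mul_emod, Int.emod_emod_of_dvd _ dvd_rfl]

-- product of two reduced powers, reduced: g^i·g^n mod p = g^(n+i) mod p
lemma pv_pm_mul (g p : Int) (hp : 0 < p) (i n : Nat) :
    PySem.Int.mod (PySem.Int.powMod g i p * PySem.Int.powMod g n p) p
      = PySem.Int.powMod g (n + i) p := by
  simp only [PySem.Int.powMod, PySem.Int.mod_eq_emod_of_pos hp]
  rw [pow_add, Int.mul_emod (g ^ n) (g ^ i),
    Int.mul_emod (g ^ i % p) (g ^ n % p),
    Int.emod_emod_of_dvd _ dvd_rfl, Int.emod_emod_of_dvd _ dvd_rfl, mul_comm]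

-- A's loop invariant: starting at index k with accumulator g^k mod p produces
-- the same dict as inserting the closed-form powers over the same range
lemma pv_loop (g p : Int) (hp : 0 < p) :
    ∀ (n : Nat) (k : Nat) (d : PySem.Dict Int Int),
    ((PySem.List.pyRange k (k + n) 1).foldl
      (fun (st : PySem.Dict Int Int × Int) i =>
        (st.1.insert st.2 i, PySem.Int.mod (st.2 * g) p))
      (d, PySem.Int.powMod g k p)).1
    = (PySem.List.pyRange k (k + n) 1).foldl
      (fun (d : PySem.Dict Int Int) i => d.insert (PySem.Int.powMod g i.toNat p) i) d := by
  intro n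
  induction n with
  | zero => intro k d; simp
  | succ n ih =>
    intro k d
    have hc : ((n + 1 : Nat) : Int) = (n : Int) + 1 := by push_cast; ring
    rw [hc]
    have hlt : (k : Int) < k + ((n : Int) + 1) := by omega
    rw [PySem.List.pyRange_one_cons hlt]
    simp only [List.foldl_cons]
    have h1 : ((k : Int) + 1) = ((k + 1 : Nat) : Int) := by omega
    have h2 : ((k : Int) + (n + 1)) = ((k + 1 : Nat) : Int) + n := by omega
    rw [pv_mod_step g p hp k, h2, h1, Int.toNat_natCast]
    exact ih (k + 1) _

-- B's doubling loop: from a table of the first n powers, with enough fuel, it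
-- produces the table of the first N powers for some N ≥ m
lemma pv_grow (g p : Int) (hp : 0 < p) (m : Nat) :
    ∀ (f n : Nat), 1 ≤ n → m ≤ n * 2 ^ f →
    ∃ N, m ≤ N ∧
      pvGrow g p m f ((List.range n).map (fun i => PySem.Int.powMod g i p))
        = (List.range N).map (fun i => PySem.Int.powMod g i p) := by
  intro f
  induction f with
  | zero =>
    intro n h1 hm
    exact ⟨n, by simpa using hm, rfl⟩
  | succ f ih =>
    intro n h1 hm
    by_cases hlen : ((List.range n).map (fun i => PySem.Int.powMod g i p)).length < m
    · have hne : ((List.range n).map (fun i => PySem.Int.powMod g i p)) ≠ [] := by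
        simp; omega
      have hlast : PySem.List.pyGetD ((List.range n).map (fun i => PySem.Int.powMod g i p)) (-1) 0
          = PySem.Int.powMod g (n - 1) p := by
        rw [PySem.List.pyGetD_neg_one _ _ hne, List.getLast_eq_getElem]
        simp only [List.length_map, List.length_range, List.getElem_map, List.getElem_range]
      have hstep : PySem.Int.mod (PySem.Int.powMod g (n - 1) p * g) p
          = PySem.Int.powMod g n p := by
        rw [pv_mod_step g p hp (n - 1), Nat.sub_add_cancel h1]
      have happ :
          ((List.range n).map (fun i => PySem.Int.powMod g i p)) ++
            ((List.range n).map (fun i => PySem.Int.powMod g i p)).map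
              (fun x => PySem.Int.mod (x * PySem.Int.powMod g n p) p)
          = (List.range (n + n)).map (fun i => PySem.Int.powMod g i p) := by
        rw [List.range_add, List.map_append, List.map_map, List.map_map]
        congr 1
        apply List.map_congr_left
        intro i _
        simp [Function.comp, pv_pm_mul g p hp i n]
      rw [pvGrow, if_pos hlen]
      rw [hlast, hstep, happ]
      exact ih (n + n) (by omega) (by rw [pow_succ] at hm; nlinarith)
    · refine ⟨n, ?_, by rw [pvGrow, if_neg hlen]⟩
      simp at hlen; omega

lemma pv_powMod_zero (g p : Int) (hp : 2 ≤ p) : PySem.Int.powMod g 0 p = 1 := by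
  simp only [PySem.Int.powMod, pow_zero, PySem.Int.mod_eq_emod_of_pos (by omega : (0:Int) < p)]
  exact Int.emod_eq_of_lt (by omega) (by omega)

lemma pv_ceilSqrt_zero : pvCeilSqrt 0 = 0 := by decide

-- B's zip-fold over the truncated table equals the canonical range-fold
lemma pv_zip_fold (g p : Int) (m : Nat) :
    ((((List.range m).map (fun i => PySem.Int.powMod g i p)).zip
        (PySem.List.pyRange 0 (m : Int) 1)).foldl
      (fun (d : PySem.Dict Int Int) kv => d.insert kv.1 kv.2) PySem.Dict.empty)
    = (PySem.List.pyRange 0 (m : Int) 1).foldl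
        (fun (d : PySem.Dict Int Int) i => d.insert (PySem.Int.powMod g i.toNat p) i)
        PySem.Dict.empty := by
  rw [PySem.List.pyRange_one]
  simp only [sub_zero, Int.toNat_natCast, zero_add]
  rw [List.zip_map', List.foldl_map, List.foldl_map]
  simp

-- ===== VERDICT (by name: the statement is the Claim_ definition above) =====
theorem baby_list_spec : Claim_equal_baby_list := by
  intro g p _ hpre
  unfold Spec_baby_list baby_list baby_list_alt
  rcases lt_or_ge p 2 with hp | hp
  · -- p = 1: m = 0, both sides are the empty dict
    have : p = 1 := by unfold Pre_baby_list at hpre; omega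
    subst this
    simp [pv_ceilSqrt_zero, pvGrow]
  · have hp0 : (0 : Int) < p := by omega
    have hm : (0 : Int) ≤ pvCeilSqrt (p - 1) := by
      simp only [pvCeilSqrt]; split <;> positivity
    obtain ⟨M, hMeq⟩ : ∃ M : Nat, pvCeilSqrt (p - 1) = (M : Int) :=
      ⟨_, (Int.toNat_of_nonneg hm).symm⟩
    rw [hMeq]
    simp only [Int.toNat_natCast]
    -- A's side: the running-product fold is the canonical fold
    have hA := pv_loop g p hp0 M 0 PySem.Dict.empty
    rw [pv_powMod_zero g p hp] at hA
    simp only [Nat.cast_zero, zero_add] at hA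
    -- B's side: the grown table truncates to the first-M power table
    obtain ⟨N, hN, hgrow⟩ := pv_grow g p hp0 M M 1 le_rfl
      (by have := Nat.lt_two_pow_self (n := M); omega)
    have hone : (List.range 1).map (fun i => PySem.Int.powMod g i p) = [1] := by
      simp [pv_powMod_zero g p hp]
    rw [hone] at hgrow
    rw [hgrow, ← List.map_take, List.take_range, Nat.min_eq_left hN, pv_zip_fold g p M]
    exact congrArg PySem.Dict.items hA
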